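-- pv_equiv track=rewrite | github.com/itsmhyles/codepath_tip_102 | week_3/qn2.5.py | count_explorers
-- ===== SOURCE A (Python) =====
-- def count_explorers(explorers, supplies):
--     # Convert lists to queues for easier manipulation
--     explorer_queue = explorers.copy()
--     supply_queue = supplies.copy()
--
--     attempts = 0
--     max_attempts = len(explorers) * len(supplies)  # Prevent infinite loop
--
--     while explorer_queue and supply_queue and attempts < max_attempts:
--         explorer = explorer_queue[0]
--         supply = supply_queue[0]
--
--         if explorer == supply:
--             # Explorer gets the supply
--             explorer_queue.pop(0)
--             supply_queue.pop(0)
--         else: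
--             # Explorer goes to the end of the queue
--             explorer_queue.append(explorer_queue.pop(0))
--
--         attempts += 1
--
--     return len(explorer_queue)
-- ===== SOURCE B (Python) =====
-- def count_explorers(explorers, supplies):
--     # One pass: multiset of explorer values, then scan supplies in order,
--     # decrementing on match and stopping at the first unmatchable supply.
--     counts = {}
--     for e in explorers:
--         counts[e] = counts.get(e, 0) + 1
--     remaining = len(explorers)
--     for s in supplies:
--         if counts.get(s, 0) > 0:
--             counts[s] = counts[s] - 1
--             remaining -= 1
--         else:
--             break
--     return remaining
-- ===== Notes on version B (the rewrite author's own statement) =====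
-- stated objective: faster
-- what changed: Replaces the capped queue-rotation simulation (repeatedly rotating the explorer queue with O(n) pop(0) until the front supply matches) by a single counter pass: build a multiset of explorer values, scan supplies in order decrementing on match and stopping at the first unmatchable supply.
import Mathlib
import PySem

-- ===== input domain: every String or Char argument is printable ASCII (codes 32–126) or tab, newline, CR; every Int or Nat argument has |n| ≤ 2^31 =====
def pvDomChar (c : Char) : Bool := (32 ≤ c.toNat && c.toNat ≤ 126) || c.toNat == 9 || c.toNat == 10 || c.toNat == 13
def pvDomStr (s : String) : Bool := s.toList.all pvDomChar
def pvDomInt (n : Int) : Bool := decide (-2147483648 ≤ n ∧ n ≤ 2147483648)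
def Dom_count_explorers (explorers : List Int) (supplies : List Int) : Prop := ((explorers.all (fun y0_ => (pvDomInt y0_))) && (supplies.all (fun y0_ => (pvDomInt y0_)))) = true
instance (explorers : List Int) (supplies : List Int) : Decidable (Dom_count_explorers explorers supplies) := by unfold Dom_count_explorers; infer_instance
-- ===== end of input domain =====

-- B replaces A's capped queue-rotation simulation by a single counter pass over the supplies (asymptotically faster).

-- ===== PORT A =====
-- the while loop: fuel = max_attempts - attempts (the loop also stops when either queue empties)
def pvRotLoop : Nat → List Int → List Int → List Int
  | 0, eq, _ => eq
  | _ + 1, [], _ => []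
  | _ + 1, e :: es, [] => e :: es
  | f + 1, e :: es, s :: ss =>
      if e = s then pvRotLoop f es ss
      else pvRotLoop f (es ++ [e]) (s :: ss)

def count_explorers (explorers : List Int) (supplies : List Int) : Int :=
  ((pvRotLoop (explorers.length * supplies.length) explorers supplies).length : Int)

-- ===== PORT B =====
-- the second loop of Source B (with its break): scan supplies, decrement on match, stop at first miss
def pvSupplyLoop (counts : PySem.Dict Int Int) (remaining : Int) : List Int → Int
  | [] => remaining
  | s :: ss =>
      if counts.getD s 0 > 0 then
        pvSupplyLoop (counts.insert s (counts.getD s 0 - 1)) (remaining - 1) ss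
      else remaining

def count_explorers_alt (explorers : List Int) (supplies : List Int) : Int :=
  pvSupplyLoop (explorers.foldl (fun d e => d.insert e (d.getD e 0 + 1)) PySem.Dict.empty)
    (explorers.length : Int) supplies

-- ===== PRECONDITION & SPEC =====
def Spec_count_explorers (explorers : List Int) (supplies : List Int) (out : Int) : Prop := out = count_explorers_alt explorers supplies
instance (explorers : List Int) (supplies : List Int) (out : Int) : Decidable (Spec_count_explorers explorers supplies out) := by unfold Spec_count_explorers; infer_instance

-- ===== CLAIM (what is proved, stated in full; the proofs are below) =====
def Claim_equal_count_explorers : Prop := ∀ (explorers : List Int) (supplies : List Int), Dom_count_explorers explorers supplies → Spec_count_explorers explorers supplies (count_explorers explorers supplies)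

-- ===== LEMMAS AND PROOFS =====

-- number of supplies matched before the first unmatchable one (common characterisation)
def pvMatched : List Int → List Int → Nat
  | _, [] => 0
  | q, s :: ss => if 0 < q.count s then 1 + pvMatched (q.erase s) ss else 0

theorem pvMatched_perm : ∀ (ss : List Int) {q q' : List Int}, q.Perm q' → pvMatched q ss = pvMatched q' ss := by
  intro ss
  induction ss with
  | nil => intro q q' _; rfl
  | cons s ss ih =>
    intro q q' h
    simp only [pvMatched, h.count_eq s]
    split
    · rw [ih (h.erase s)]
    · rfl

theorem pvMatched_le (ss q : List Int) : pvMatched q ss ≤ q.length := by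
  induction ss generalizing q with
  | nil => simp [pvMatched]
  | cons s ss ih =>
    simp only [pvMatched]
    split
    · rename_i h
      have hm : s ∈ q := by
        have := List.count_pos_iff.mp h; exact this
      have h1 : (q.erase s).length = q.length - 1 := List.length_erase_of_mem hm
      have h2 := ih (q.erase s)
      have h3 : 1 ≤ q.length := List.length_pos_of_mem hm
      omega
    · omega

-- A-side: the rotation phase before a match
theorem pvRot (s : Int) (ss : List Int) : ∀ (a b : List Int) (f : Nat), s ∉ a → a.length + 1 ≤ f →
    pvRotLoop f (a ++ s :: b) (s :: ss) = pvRotLoop (f - (a.length + 1)) (b ++ a) ss := by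
  intro a
  induction a with
  | nil =>
    intro b f _ hf
    obtain ⟨f', rfl⟩ : ∃ f', f = f' + 1 := ⟨f - 1, by omega⟩
    simp [pvRotLoop]
  | cons e a ih =>
    intro b f hmem hf
    obtain ⟨f', rfl⟩ : ∃ f', f = f' + 1 := ⟨f - 1, by omega⟩
    have hne : e ≠ s := fun h => hmem (by simp [h])
    have hsa : s ∉ a := fun h => hmem (by simp [h])
    have : pvRotLoop (f' + 1) ((e :: a) ++ s :: b) (s :: ss)
        = pvRotLoop f' ((a ++ s :: b) ++ [e]) (s :: ss) := by
      simp [pvRotLoop, hne]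
    rw [this]
    have heq : (a ++ s :: b) ++ [e] = a ++ s :: (b ++ [e]) := by simp
    rw [heq, ih (b ++ [e]) f' hsa (by simp at hf ⊢; omega)]
    simp only [List.length_cons]
    congr 1
    · omega
    · simp
  
-- A-side: rotations with an unmatchable supply at the front never change the length
theorem pvStuck (s : Int) (ss : List Int) : ∀ (f : Nat) (q : List Int), s ∉ q →
    (pvRotLoop f q (s :: ss)).length = q.length := by
  intro f
  induction f with
  | zero => intro q _; rfl
  | succ f ih =>
    intro q hq
    match q with
    | [] => rfl
    | e :: es =>
      have hne : e ≠ s := fun h => hq (by simp [h])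
      have hs : s ∉ es ++ [e] := by
        intro h
        rcases List.mem_append.mp h with h | h
        · exact hq (by simp [h])
        · simp at h; exact hne h.symm
      have : pvRotLoop (f + 1) (e :: es) (s :: ss) = pvRotLoop f (es ++ [e]) (s :: ss) := by
        simp [pvRotLoop, hne]
      rw [this, ih _ hs]
      simp

theorem pvRotLoop_nil (f : Nat) (q : List Int) : pvRotLoop f q [] = q := by
  cases f <;> cases q <;> rfl

-- first-occurrence split
theorem pvMemSplit {s : Int} {q : List Int} (h : s ∈ q) : ∃ a b, q = a ++ s :: b ∧ s ∉ a := by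
  induction q with
  | nil => cases h
  | cons e es ih =>
    by_cases he : e = s
    · exact ⟨[], es, by simp [he], by simp⟩
    · have hes : s ∈ es := by
        rcases List.mem_cons.mp h with h | h
        · exact absurd h.symm he
        · exact h
      rcases ih hes with ⟨a, b, rfl, hna⟩
      refine ⟨e :: a, b, rfl, ?_⟩
      intro hc
      rcases List.mem_cons.mp hc with hc | hc
      · exact he hc.symm
      · exact hna hc

-- A-side main invariant: with fuel ≥ |q|·|ss| the loop realises exactly pvMatched pops
theorem pvA_main : ∀ (ss q : List Int) (f : Nat), q.length * ss.length ≤ f →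
    (pvRotLoop f q ss).length = q.length - pvMatched q ss := by
  intro ss
  induction ss with
  | nil => intro q f _; rw [pvRotLoop_nil]; simp [pvMatched]
  | cons s ss ih =>
    intro q f hf
    by_cases hmem : s ∈ q
    · rcases pvMemSplit hmem with ⟨a, b, rfl, hna⟩
      have hlen : (a ++ s :: b).length = a.length + b.length + 1 := by
        simp only [List.length_append, List.length_cons]; omega
      have hfa : a.length + 1 ≤ f := by
        have h1 : (a ++ s :: b).length * 1 ≤ (a ++ s :: b).length * (s :: ss).length :=
          Nat.mul_le_mul_left _ (by simp)
        simp only [Nat.mul_one] at h1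
        have := le_trans h1 hf
        omega
      rw [pvRot s ss a b f hna hfa]
      have hfuel : (b ++ a).length * ss.length ≤ f - (a.length + 1) := by
        have h1 : (a.length + b.length) * ss.length + ss.length + (a.length + b.length + 1)
            = (a ++ s :: b).length * (s :: ss).length := by
          simp only [List.length_append, List.length_cons]
          ring
        have h2 := hf
        rw [← h1] at h2
        have h3 : (b.length + a.length) * ss.length = (a.length + b.length) * ss.length := by ring
        simp only [List.length_append]
        omega
      rw [ih _ _ hfuel]
      have hperm : (b ++ a).Perm ((a ++ s :: b).erase s) := by
        rw [List.erase_append_right _ hna, List.erase_cons_head]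
        exact List.perm_append_comm
      rw [pvMatched_perm ss hperm]
      have hcnt : 0 < (a ++ s :: b).count s := by
        have : s ∈ a ++ s :: b := by simp
        exact List.count_pos_iff.mpr this
      have hble : pvMatched ((a ++ s :: b).erase s) ss ≤ ((a ++ s :: b).erase s).length :=
        pvMatched_le _ _
      have herlen : ((a ++ s :: b).erase s).length = (a ++ s :: b).length - 1 :=
        List.length_erase_of_mem (by simp)
      simp only [pvMatched, hcnt, if_pos]
      simp only [List.length_append, List.length_cons] at *
      omega
    · have hcnt : ¬ 0 < q.count s := by
        simp [List.count_pos_iff, hmem]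
      rw [pvStuck s ss f q hmem]
      simp [pvMatched, hcnt]

-- B-side invariant: the counter dict represents the multiset q
theorem pvB_main : ∀ (ss : List Int) (d : PySem.Dict Int Int) (q : List Int) (r : Int),
    (∀ x, d.getD x 0 = (q.count x : Int)) →
    pvSupplyLoop d r ss = r - (pvMatched q ss : Int) := by
  intro ss
  induction ss with
  | nil => intro d q r _; simp [pvSupplyLoop, pvMatched]
  | cons s ss ih =>
    intro d q r hd
    simp only [pvSupplyLoop, pvMatched]
    by_cases hc : 0 < q.count s
    · have hd' : d.getD s 0 > 0 := by rw [hd]; exact_mod_cast hc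
      rw [if_pos hd', if_pos hc]
      have hmem : s ∈ q := List.count_pos_iff.mp hc
      have hrep : ∀ x, (d.insert s (d.getD s 0 - 1)).getD x 0 = ((q.erase s).count x : Int) := by
        intro x
        by_cases hx : x = s
        · subst hx
          rw [PySem.Dict.getD_insert_self, hd, List.count_erase_self]
          omega
        · rw [PySem.Dict.getD_insert_of_ne _ _ _ hx, hd, List.count_erase_of_ne hx]
      rw [ih _ _ _ hrep]
      push_cast
      ring
    · have hd' : ¬ d.getD s 0 > 0 := by rw [hd]; omega
      rw [if_neg hd', if_neg hc]
      simp

-- ===== VERDICT (by name: the statement is the Claim_ definition above) =====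
theorem count_explorers_spec : Claim_equal_count_explorers := by
  intro explorers supplies _
  unfold Spec_count_explorers count_explorers count_explorers_alt
  rw [PySem.Dict.foldl_insert_getD_add_one_eq_counter]
  rw [pvB_main supplies _ explorers _ (fun x => PySem.Dict.getD_counter explorers x)]
  rw [pvA_main supplies explorers _ le_rfl]
  have h1 := pvMatched_le supplies explorers
  push_cast [Nat.cast_sub h1]
  ring
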